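-- pv_equiv track=rewrite | github.com/slidracoon72/leetcode | OAs/harshitaa_q2.py | findRecurringNames
-- ===== SOURCE A (Python) =====
-- def findRecurringNames(realNames, allNames):
--     from collections import defaultdict
--
--     # Initialize a dictionary to store the sorted names and their counts
--     name_counts = defaultdict(int)
--
--     # Count occurrences of each sorted name in allNames
--     for name in allNames:
--         for real_name in realNames:
--             if sorted(real_name) == sorted(name):
--                 name_counts[real_name] += 1
--                 break
--
--     # Initialize a list to store recurring names
--     recurring_names = []
--
--     # Iterate through the name_counts dictionary to find recurring names
--     for name, count in name_counts.items():
--         if count > 1: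
--             recurring_names.append(name)
--
--     # Sort the recurring names in lexicographical order
--     recurring_names.sort()
--
--     # If there are no recurring names, return ["None"]
--     if not recurring_names:
--         return ["None"]
--
--     return recurring_names
-- ===== SOURCE B (Python) =====
-- def findRecurringNames(realNames, allNames):
--     from collections import Counter
--     cnt = Counter(''.join(sorted(n)) for n in allNames)
--     seen = set()
--     res = []
--     for r in realNames:
--         s = ''.join(sorted(r))
--         if s in seen:
--             continue
--         seen.add(s)
--         if cnt[s] > 1:
--             res.append(r)
--     res.sort()
--     return res if res else ["None"]
-- ===== Notes on version B (the rewrite author's own statement) =====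
-- stated objective: faster
-- what changed: Instead of A's nested scan (for every allName, re-sort and compare against every realName), B builds a Counter of sorted-string signatures over allNames in one pass, then scans realNames once with a seen-signature set, so each name is sorted exactly once and the inner scan disappears.
import Mathlib
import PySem

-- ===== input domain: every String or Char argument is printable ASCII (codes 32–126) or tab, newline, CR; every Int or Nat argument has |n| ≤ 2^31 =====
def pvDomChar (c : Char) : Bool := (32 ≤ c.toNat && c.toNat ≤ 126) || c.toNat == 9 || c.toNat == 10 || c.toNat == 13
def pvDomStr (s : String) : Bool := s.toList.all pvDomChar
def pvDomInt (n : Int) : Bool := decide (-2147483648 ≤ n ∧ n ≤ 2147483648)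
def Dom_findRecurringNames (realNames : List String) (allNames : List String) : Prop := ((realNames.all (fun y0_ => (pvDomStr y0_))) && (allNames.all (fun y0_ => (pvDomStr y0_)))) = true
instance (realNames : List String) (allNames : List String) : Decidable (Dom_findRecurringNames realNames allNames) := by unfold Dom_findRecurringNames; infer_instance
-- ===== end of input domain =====

-- B replaces A's nested rescan (every allName compared against every realName, re-sorting both
-- each time) by a one-pass Counter of sorted-string signatures over allNames followed by a single
-- scan of realNames with a seen-signature set; objective: faster (each name is sorted once).

-- ===== PORT A =====
-- sorted(s) on a string: the list of its characters in sorted order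
def pvSortChars (s : String) : List Char := PySem.List.sorted s.toList (fun c => c) false

-- the inner 'for real_name in realNames: … break' loop of A
def pvAInner (d : PySem.Dict String Int) (name : String) : List String → PySem.Dict String Int
  | [] => d
  | r :: rest =>
    if pvSortChars r = pvSortChars name then d.modify r 0 (· + 1)
    else pvAInner d name rest

def findRecurringNames (realNames : List String) (allNames : List String) : List String :=
  let nameCounts := allNames.foldl (fun d name => pvAInner d name realNames) PySem.Dict.empty
  let recurring := nameCounts.items.foldl
    (fun acc kv => if (1 : Int) < kv.2 then acc ++ [kv.1] else acc) []
  let recurring := PySem.List.sorted recurring (fun x => x) false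
  if recurring = [] then ["None"] else recurring

-- ===== PORT B =====
-- ''.join(sorted(s)) : the anagram signature as a string
def pvSigStr (s : String) : String := String.ofList (PySem.List.sorted s.toList (fun c => c) false)

def findRecurringNames_alt (realNames : List String) (allNames : List String) : List String :=
  let cnt := PySem.Dict.counter (allNames.map pvSigStr)
  let st := realNames.foldl
    (fun (st : PySem.Set String × List String) r =>
      if PySem.Set.contains st.1 (pvSigStr r) then st
      else (PySem.Set.add st.1 (pvSigStr r),
        if (1 : Int) < cnt.getD (pvSigStr r) 0 then st.2 ++ [r] else st.2))
    (PySem.Set.empty, [])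
  let res := PySem.List.sorted st.2 (fun x => x) false
  if res = [] then ["None"] else res

-- ===== PRECONDITION & SPEC =====
def Spec_findRecurringNames (realNames : List String) (allNames : List String) (out : List String) : Prop := out = findRecurringNames_alt realNames allNames
instance (realNames : List String) (allNames : List String) (out : List String) : Decidable (Spec_findRecurringNames realNames allNames out) := by unfold Spec_findRecurringNames; infer_instance

-- ===== CLAIM (what is proved, stated in full; the proofs are below) =====
def Claim_equal_findRecurringNames : Prop := ∀ (realNames : List String) (allNames : List String), Dom_findRecurringNames realNames allNames → Spec_findRecurringNames realNames allNames (findRecurringNames realNames allNames)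

-- ===== LEMMAS AND PROOFS =====

theorem pvSig_eq_iff (a b : String) : pvSigStr a = pvSigStr b ↔ pvSortChars a = pvSortChars b := by
  unfold pvSigStr pvSortChars
  constructor
  · intro h; have := congrArg String.toList h; simpa using this
  · intro h; rw [h]

-- generic: a foldl that acts only on the `some` results of f is a foldl over filterMap f
theorem pv_foldl_filterMap {α β σ : Type} (f : α → Option β) (g : σ → β → σ) :
    ∀ (l : List α) (s : σ),
      l.foldl (fun s a => (f a).elim s (g s)) s
        = (l.filterMap f).foldl g s := by
  intro l
  induction l with
  | nil => intro s; rfl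
  | cons a t ih =>
    intro s
    rw [List.foldl_cons, List.filterMap_cons]
    cases hfa : f a with
    | none =>
      simp only [Option.elim_none]
      rw [ih]
    | some b =>
      simp only [Option.elim_some]
      rw [ih, List.foldl_cons]

-- A's first-matching realName for a given name
def pvFirst (realNames : List String) (x : String) : Option String :=
  realNames.find? (fun r => decide (pvSortChars r = pvSortChars x))

theorem pvFirst_cons (r : String) (rest : List String) (name : String) :
    pvFirst (r :: rest) name
      = if pvSortChars r = pvSortChars name then some r else pvFirst rest name := by
  unfold pvFirst
  rw [List.find?_cons]
  by_cases h : pvSortChars r = pvSortChars name <;> simp [h]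

theorem pvAInner_eq (d : PySem.Dict String Int) (name : String) (rs : List String) :
    pvAInner d name rs = (pvFirst rs name).elim d (fun r => d.modify r 0 (· + 1)) := by
  induction rs with
  | nil => rfl
  | cons r rest ih =>
    rw [pvFirst_cons]
    by_cases h : pvSortChars r = pvSortChars name <;> simp [pvAInner, h, ih]

-- the 'if count > 1: append name' loop over items
theorem pv_foldl_append_if_fst (l : List (String × Int)) :
    ∀ acc : List String,
      l.foldl (fun acc kv => if (1 : Int) < kv.2 then acc ++ [kv.1] else acc) acc
        = acc ++ (l.filter (fun kv => decide ((1 : Int) < kv.2))).map Prod.fst := by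
  induction l with
  | nil => intro acc; simp
  | cons kv t ih =>
    intro acc
    by_cases h : (1 : Int) < kv.2 <;> simp [h, ih]

theorem pvFirst_eq_some_iff (realNames : List String) (a x : String) :
    pvFirst realNames a = some x ↔ pvSortChars a = pvSortChars x ∧ pvFirst realNames x = some x := by
  constructor
  · intro h
    have hx : pvSortChars x = pvSortChars a := by
      have := List.find?_some h
      simpa using this
    refine ⟨hx.symm, ?_⟩
    rw [pvFirst] at h ⊢
    have : (fun r => decide (pvSortChars r = pvSortChars x))
        = (fun r => decide (pvSortChars r = pvSortChars a)) := by
      funext r; simp [hx]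
    rw [this]; exact h
  · rintro ⟨hsig, h⟩
    rw [pvFirst] at h ⊢
    have : (fun r => decide (pvSortChars r = pvSortChars a))
        = (fun r => decide (pvSortChars r = pvSortChars x)) := by
      funext r; simp [hsig]
    rw [this]; exact h

-- A's pre-sort list characterised
def pvAL (realNames allNames : List String) : List String :=
  (PySem.Set.ofList (allNames.filterMap (pvFirst realNames))).filter
    (fun k => decide ((1 : Int) < ((allNames.filterMap (pvFirst realNames)).count k : Int)))

theorem pvA_pre_eq (realNames allNames : List String) :
    (allNames.foldl (fun d name => pvAInner d name realNames) PySem.Dict.empty).items.foldl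
      (fun acc kv => if (1 : Int) < kv.2 then acc ++ [kv.1] else acc) []
      = pvAL realNames allNames := by
  have h1 : (allNames.foldl (fun d name => pvAInner d name realNames) PySem.Dict.empty)
      = PySem.Dict.counter (allNames.filterMap (pvFirst realNames)) := by
    simp only [pvAInner_eq]
    rw [pv_foldl_filterMap (pvFirst realNames) (fun (d : PySem.Dict String Int) r => d.modify r 0 (· + 1))]
    rfl
  rw [h1, pv_foldl_append_if_fst, PySem.Dict.items_counter]
  simp [pvAL, List.filter_map, List.map_map, Function.comp_def]

theorem pv_nodup_AL (realNames allNames : List String) : (pvAL realNames allNames).Nodup :=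
  List.Nodup.filter _ (PySem.Set.nodup_ofList _)

theorem pv_count_map_sig (allNames : List String) (x : String) :
    ((allNames.map pvSigStr).count (pvSigStr x) : Int)
      = (allNames.countP (fun a => decide (pvSortChars a = pvSortChars x)) : Int) := by
  have : (allNames.map pvSigStr).count (pvSigStr x)
      = allNames.countP (fun a => decide (pvSortChars a = pvSortChars x)) := by
    rw [List.count, List.countP_map]
    apply List.countP_congr
    intro a _
    simp [Function.comp, beq_iff_eq, pvSig_eq_iff]
  rw [this]

theorem pv_mem_AL (realNames allNames : List String) (x : String) :
    x ∈ pvAL realNames allNames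
      ↔ pvFirst realNames x = some x
          ∧ 1 < allNames.countP (fun a => decide (pvSortChars a = pvSortChars x)) := by
  unfold pvAL
  rw [List.mem_filter]
  simp only [PySem.Set.mem_ofList, decide_eq_true_eq]
  constructor
  · rintro ⟨hmem, hcnt⟩
    have hx : pvFirst realNames x = some x := by
      rcases List.mem_filterMap.mp hmem with ⟨a, _, hfa⟩
      exact ((pvFirst_eq_some_iff realNames a x).mp hfa).2
    refine ⟨hx, ?_⟩
    have hc : (allNames.filterMap (pvFirst realNames)).count x
        = allNames.countP (fun a => decide (pvSortChars a = pvSortChars x)) := by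
      rw [List.count_filterMap]
      apply List.countP_congr
      intro a _
      simp only [beq_iff_eq, decide_eq_true_eq]
      rw [pvFirst_eq_some_iff realNames a x]
      constructor
      · exact fun h => h.1
      · exact fun h => ⟨h, hx⟩
    rw [hc] at hcnt
    exact_mod_cast hcnt
  · rintro ⟨hx, hcnt⟩
    have hc : (allNames.filterMap (pvFirst realNames)).count x
        = allNames.countP (fun a => decide (pvSortChars a = pvSortChars x)) := by
      rw [List.count_filterMap]
      apply List.countP_congr
      intro a _
      simp only [beq_iff_eq, decide_eq_true_eq]
      rw [pvFirst_eq_some_iff realNames a x]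
      constructor
      · exact fun h => h.1
      · exact fun h => ⟨h, hx⟩
    constructor
    · exact List.count_pos_iff.mp (by rw [hc]; omega)
    · rw [hc]; exact_mod_cast hcnt

-- B's loop, rephrased as a structural recursion on realNames
def pvBAux (cnt : PySem.Dict String Int) (seen : PySem.Set String) : List String → List String
  | [] => []
  | r :: rs =>
    if PySem.Set.contains seen (pvSigStr r) then pvBAux cnt seen rs
    else (if (1 : Int) < cnt.getD (pvSigStr r) 0 then [r] else [])
        ++ pvBAux cnt (PySem.Set.add seen (pvSigStr r)) rs

theorem pvB_fold_eq (cnt : PySem.Dict String Int) :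
    ∀ (rs : List String) (seen : PySem.Set String) (res : List String),
      (rs.foldl (fun (st : PySem.Set String × List String) r =>
          if PySem.Set.contains st.1 (pvSigStr r) then st
          else (PySem.Set.add st.1 (pvSigStr r),
            if (1 : Int) < cnt.getD (pvSigStr r) 0 then st.2 ++ [r] else st.2))
        (seen, res)).2
        = res ++ pvBAux cnt seen rs := by
  intro rs
  induction rs with
  | nil => intro seen res; simp [pvBAux]
  | cons r t ih =>
    intro seen res
    rw [List.foldl_cons]
    by_cases hc : PySem.Set.contains seen (pvSigStr r) = true
    · rw [if_pos hc, ih]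
      simp only [pvBAux, hc, if_true]
    · rw [if_neg hc, ih]
      simp only [pvBAux, hc, Bool.false_eq_true, if_false]
      by_cases hcnt : (1 : Int) < cnt.getD (pvSigStr r) 0 <;>
        simp [hcnt]

theorem pv_mem_BAux (cnt : PySem.Dict String Int) :
    ∀ (rs : List String) (seen : PySem.Set String) (x : String),
      x ∈ pvBAux cnt seen rs
        ↔ pvSigStr x ∉ seen
            ∧ rs.find? (fun r => decide (pvSigStr r = pvSigStr x)) = some x
            ∧ (1 : Int) < cnt.getD (pvSigStr x) 0 := by
  intro rs
  induction rs with
  | nil => intro seen x; simp [pvBAux]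
  | cons r t ih =>
    intro seen x
    by_cases hs : pvSigStr r = pvSigStr x
    · rw [List.find?_cons_of_pos (by simp [hs])]
      by_cases hc : PySem.Set.contains seen (pvSigStr r) = true
      · have hmem : pvSigStr x ∈ seen := hs ▸ (PySem.Set.contains_iff _ _).mp hc
        rw [pvBAux, if_pos hc, ih]
        constructor
        · rintro ⟨hns, _, _⟩; exact absurd hmem hns
        · rintro ⟨hns, _, _⟩; exact absurd hmem hns
      · have hnmem : pvSigStr x ∉ seen := fun h =>
          hc ((PySem.Set.contains_iff _ _).mpr (hs ▸ h))
        rw [pvBAux, if_neg hc, List.mem_append, ih]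
        constructor
        · rintro (hin | ⟨hns, _, _⟩)
          · by_cases hcnt : (1 : Int) < cnt.getD (pvSigStr r) 0
            · rw [if_pos hcnt] at hin
              rcases List.mem_singleton.mp hin with rfl
              exact ⟨hnmem, rfl, hs ▸ hcnt⟩
            · rw [if_neg hcnt] at hin
              exact absurd hin (List.not_mem_nil)
          · exact absurd ((PySem.Set.mem_add _ _ _).mpr (Or.inr hs.symm)) hns
        · rintro ⟨hns, hx, hcnt⟩
          left
          have hxr : r = x := by injection hx
          subst hxr
          rw [if_pos (hs ▸ hcnt)]
          exact List.mem_singleton.mpr rfl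
    · rw [List.find?_cons_of_neg (by simp [hs])]
      by_cases hc : PySem.Set.contains seen (pvSigStr r) = true
      · rw [pvBAux, if_pos hc, ih]
      · rw [pvBAux, if_neg hc, List.mem_append, ih]
        constructor
        · rintro (hin | ⟨hns, hfind, hcnt⟩)
          · by_cases hcnt : (1 : Int) < cnt.getD (pvSigStr r) 0
            · rw [if_pos hcnt] at hin
              rcases List.mem_singleton.mp hin with rfl
              exact absurd rfl hs
            · rw [if_neg hcnt] at hin
              exact absurd hin (List.not_mem_nil)
          · refine ⟨fun h => hns ((PySem.Set.mem_add _ _ _).mpr (Or.inl h)), hfind, hcnt⟩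
        · rintro ⟨hns, hfind, hcnt⟩
          right
          refine ⟨?_, hfind, hcnt⟩
          intro h
          rcases (PySem.Set.mem_add _ _ _).mp h with h | h
          · exact hns h
          · exact hs h.symm

theorem pv_nodup_BAux (cnt : PySem.Dict String Int) :
    ∀ (rs : List String) (seen : PySem.Set String), (pvBAux cnt seen rs).Nodup := by
  intro rs
  induction rs with
  | nil => intro seen; simp [pvBAux]
  | cons r t ih =>
    intro seen
    by_cases hc : pvSigStr r ∈ seen
    · simp [pvBAux, hc, ih]
    · have hcb : PySem.Set.contains seen (pvSigStr r) = false := by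
        simpa using hc
      by_cases hcnt : (1 : Int) < cnt.getD (pvSigStr r) 0
      · simp only [pvBAux, hcb, Bool.false_eq_true, if_false, hcnt, if_true,
          List.singleton_append, List.nodup_cons]
        refine ⟨?_, ih _⟩
        intro hmem
        have := (pv_mem_BAux cnt t (PySem.Set.add seen (pvSigStr r)) r).mp hmem
        exact this.1 ((PySem.Set.mem_add _ _ _).mpr (Or.inr rfl))
      · simp [pvBAux, hcnt, hc, ih]

-- the two pre-sort lists have the same members
theorem pv_mem_eq (realNames allNames : List String) (x : String) :
    x ∈ pvAL realNames allNames
      ↔ x ∈ pvBAux (PySem.Dict.counter (allNames.map pvSigStr)) PySem.Set.empty realNames := by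
  rw [pv_mem_AL, pv_mem_BAux]
  have hpred : (fun r => decide (pvSigStr r = pvSigStr x))
      = (fun r => decide (pvSortChars r = pvSortChars x)) := by
    funext r; simp [pvSig_eq_iff]
  have hcnt : (PySem.Dict.counter (allNames.map pvSigStr)).getD (pvSigStr x) 0
      = ((allNames.countP (fun a => decide (pvSortChars a = pvSortChars x)) : Nat) : Int) := by
    rw [PySem.Dict.getD_counter, pv_count_map_sig]
  rw [hpred, hcnt]
  constructor
  · rintro ⟨h1, h2⟩
    exact ⟨by simp [PySem.Set.empty], h1, by exact_mod_cast h2⟩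
  · rintro ⟨_, h1, h2⟩
    exact ⟨h1, by exact_mod_cast h2⟩

theorem pv_presort_eq (realNames allNames : List String) :
    PySem.List.sorted (pvAL realNames allNames) (fun x => x) false
      = PySem.List.sorted
          (pvBAux (PySem.Dict.counter (allNames.map pvSigStr)) PySem.Set.empty realNames)
          (fun x => x) false := by
  apply PySem.List.sorted_eq_sorted_of_perm
  · exact fun a b h => h
  · rw [List.perm_ext_iff_of_nodup (pv_nodup_AL realNames allNames)
      (pv_nodup_BAux _ realNames PySem.Set.empty)]
    exact pv_mem_eq realNames allNames

-- ===== VERDICT (by name: the statement is the Claim_ definition above) =====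
theorem findRecurringNames_spec : Claim_equal_findRecurringNames := by
  intro realNames allNames _
  unfold Spec_findRecurringNames
  simp only [findRecurringNames, findRecurringNames_alt]
  rw [pvA_pre_eq, pvB_fold_eq, List.nil_append, pv_presort_eq]
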